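-- pv_equiv track=rewrite | github.com/rsprenkels/100daysOfPython | day_002/listChecker.py | isConsistent
-- ===== SOURCE A (Python) =====
-- import itertools
--
-- def isConsistent(list=[]):
--
--     if len(list) <= 1:
--         return True
--
--     for index, elem in enumerate(list):
--         list[index] = ''.join(elem.split())
--
--     for combi in itertools.permutations(list, 2):
--         if combi[0].startswith(combi[1]):
--             return False
--
--     return True
-- ===== SOURCE B (Python) =====
-- def isConsistent(list=[]):
--     words = sorted(''.join(e.split()) for e in list)
--     return all(not b.startswith(a) for a, b in zip(words, words[1:]))
-- ===== Notes on version B (the rewrite author's own statement) =====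
-- stated objective: alternative
-- what changed: B sorts the whitespace-stripped strings once and tests only adjacent pairs for the prefix relation, instead of A's scan over all ordered pairs from itertools.permutations.
import Mathlib
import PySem

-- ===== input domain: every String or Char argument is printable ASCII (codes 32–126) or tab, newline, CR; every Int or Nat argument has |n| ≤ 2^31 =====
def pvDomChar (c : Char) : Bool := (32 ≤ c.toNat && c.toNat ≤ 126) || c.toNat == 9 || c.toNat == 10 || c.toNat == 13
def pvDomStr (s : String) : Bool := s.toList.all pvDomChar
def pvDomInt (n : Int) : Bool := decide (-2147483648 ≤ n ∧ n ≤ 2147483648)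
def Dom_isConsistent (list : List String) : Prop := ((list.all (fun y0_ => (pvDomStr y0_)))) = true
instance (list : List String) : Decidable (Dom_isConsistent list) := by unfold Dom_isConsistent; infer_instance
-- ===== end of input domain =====

-- B sorts the whitespace-stripped strings and checks only adjacent pairs for the prefix relation
-- instead of all ordered pairs (a different algorithm). Return-value equivalence only: Python A
-- overwrites the caller's list with the stripped strings in place, B does not mutate it.

-- ===== PORT A =====
def isConsistent (list : List String) : Bool :=
  if list.length ≤ 1 then true
  else
    -- for index, elem in enumerate(list): list[index] = ''.join(elem.split())
    let l := list.map (fun elem => PySem.Str.join "" (PySem.Str.split₀ elem))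
    -- for combi in itertools.permutations(list, 2): if combi[0].startswith(combi[1]): return False
    if (PySem.List.permutations l 2).any
        (fun combi => PySem.Str.startswith (combi.getD 0 "") (combi.getD 1 "")) then false
    else true

-- ===== PORT B =====
def isConsistent_alt (list : List String) : Bool :=
  let words := PySem.List.sorted (list.map (fun e => PySem.Str.join "" (PySem.Str.split₀ e)))
      (fun x => x) false
  (words.zip (PySem.List.slice words (some 1) none)).all
    (fun p => !(PySem.Str.startswith p.2 p.1))

-- ===== PRECONDITION & SPEC =====
def Spec_isConsistent (list : List String) (out : Bool) : Prop := out = isConsistent_alt list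
instance (list : List String) (out : Bool) : Decidable (Spec_isConsistent list out) := by unfold Spec_isConsistent; infer_instance

-- ===== CLAIM (what is proved, stated in full; the proofs are below) =====
def Claim_equal_isConsistent : Prop := ∀ (list : List String), Dom_isConsistent list → Spec_isConsistent list (isConsistent list)

-- ===== LEMMAS AND PROOFS =====

-- some ordered pair of entries at distinct positions is in the prefix relation
def pvHasPair (l : List String) : Prop :=
  ∃ i j, ∃ (_ : i < l.length) (_ : j < l.length), i ≠ j ∧ l[j].toList <+: l[i].toList

-- some adjacent pair is in the prefix relation
def pvHasAdj (l : List String) : Prop :=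
  ∃ k, ∃ (_ : k + 1 < l.length), l[k].toList <+: l[k+1].toList

-- a prefix is lexicographically ≤ (in the order `sorted` uses)
theorem pv_chars_prefix_le : ∀ (a b : List Char), a <+: b → @LE.le _ List.LE' a b := by
  intro a
  induction a with
  | nil =>
    intro b _
    cases b with
    | nil => exact le_refl _
    | cons y b' => exact le_of_lt (List.Lex.nil)
  | cons x a' ih =>
    intro b hab
    cases b with
    | nil => simp at hab
    | cons y b' =>
      rcases List.cons_prefix_cons.mp hab with ⟨rfl, h⟩
      exact List.cons_le_cons x (ih b' h)

theorem pv_str_prefix_le (a b : String) (h : a.toList <+: b.toList) : a ≤ b := by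
  rw [String.le_iff_toList_le]
  exact pv_chars_prefix_le _ _ h

-- sandwich: a ≤ b ≤ c and a a prefix of c makes a a prefix of b
theorem pv_chars_sandwich : ∀ (a b c : List Char),
    @LE.le _ List.LE' a b → @LE.le _ List.LE' b c → a <+: c → a <+: b := by
  intro a
  induction a with
  | nil => intro b c _ _ _; exact List.nil_prefix
  | cons x a' ih =>
    intro b c hab hbc hpre
    obtain ⟨c', rfl, hpc⟩ : ∃ c', c = x :: c' ∧ a' <+: c' := by
      cases c with
      | nil => simp at hpre
      | cons z c' =>
        rcases List.cons_prefix_cons.mp hpre with ⟨rfl, h⟩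
        exact ⟨c', rfl, h⟩
    rcases lt_or_eq_of_le hab with hlt | rfl
    · rcases lt_or_eq_of_le hbc with hlt' | rfl
      · have hlex : List.Lex (· < ·) (x :: a') b := hlt
        have hlex' : List.Lex (· < ·) b (x :: c') := hlt'
        cases hlex with
        | cons h1 =>
          cases hlex' with
          | cons h2 => exact List.cons_prefix_cons.mpr ⟨rfl, ih _ _ (le_of_lt h1) (le_of_lt h2) hpc⟩
          | rel h2 => exact absurd h2 (lt_irrefl x)
        | rel h1 =>
          cases hlex' with
          | cons h2 => exact absurd h1 (lt_irrefl x)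
          | rel h2 => exact absurd (lt_trans h1 h2) (lt_irrefl x)
      · exact hpre
    · exact List.prefix_refl _

theorem pv_str_sandwich (a b c : String) (hab : a ≤ b) (hbc : b ≤ c)
    (h : a.toList <+: c.toList) : a.toList <+: b.toList :=
  pv_chars_sandwich a.toList b.toList c.toList
    (String.le_iff_toList_le.mp hab) (String.le_iff_toList_le.mp hbc) h

-- a permutation of a pair is one of its two arrangements
theorem pv_pair_perm {α : Type} (m : List α) (x y : α) (h : m.Perm [x,y]) : m = [x,y] ∨ m = [y,x] := by
  have hl : m.length = 2 := by simpa using h.length_eq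
  match m, hl with
  | [a, b], _ =>
    have ha : a ∈ [x, y] := h.mem_iff.mp (by simp)
    rcases List.mem_pair.mp ha with rfl | rfl
    · have hby : [b].Perm [y] := h.cons_inv
      have hb : b = y := by simpa using hby.mem_iff.mp (by simp)
      exact Or.inl (by rw [hb])
    · have hx : x ∈ [a, b] := h.mem_iff.mpr (by simp)
      rcases List.mem_pair.mp hx with rfl | rfl
      · have hbx : [b].Perm [x] := h.cons_inv
        have hb : b = x := by simpa using hbx.mem_iff.mp (by simp)
        exact Or.inl (by rw [hb])
      · exact Or.inr rfl

-- a two-element sublist names two positions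
theorem pv_sublist_pair_index {α : Type} (l : List α) (x y : α) (h : List.Sublist [x, y] l) :
    ∃ i j, ∃ (hi : i < l.length) (hj : j < l.length), i < j ∧ l[i] = x ∧ l[j] = y := by
  obtain ⟨is, his, hpw⟩ := List.sublist_eq_map_getElem h
  match is, his, hpw with
  | [i, j], his, hpw =>
    simp only [List.map_cons, List.map_nil, List.cons.injEq, and_true] at his
    have hlt : (i : Nat) < (j : Nat) := List.rel_of_pairwise_cons hpw (List.mem_singleton.mpr rfl)
    exact ⟨i, j, i.isLt, j.isLt, hlt, his.1.symm, his.2.symm⟩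

-- two distinct positions ↔ a two-element sub-multiset (prefix relation carried along)
theorem pv_pair_subperm_iff (l : List String) :
    pvHasPair l ↔ ∃ x y, List.Subperm [x, y] l ∧ y.toList <+: x.toList := by
  constructor
  · rintro ⟨i, j, hi, hj, hne, hp⟩
    rcases Nat.lt_or_ge i j with hij | hge
    · refine ⟨l[i], l[j], ?_, hp⟩
      exact (List.map_getElem_sublist (l := l) (is := [⟨i, hi⟩, ⟨j, hj⟩])
        (List.Pairwise.cons (by intro b hb; rw [List.mem_singleton] at hb; subst hb; exact hij)
          (List.pairwise_singleton _ _))).subperm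
    · have hji : j < i := lt_of_le_of_ne hge (Ne.symm hne)
      refine ⟨l[i], l[j], ?_, hp⟩
      have hsub : List.Sublist [l[j], l[i]] l :=
        List.map_getElem_sublist (l := l) (is := [⟨j, hj⟩, ⟨i, hi⟩])
          (List.Pairwise.cons (by intro b hb; rw [List.mem_singleton] at hb; subst hb; exact hji)
            (List.pairwise_singleton _ _))
      exact ⟨[l[j], l[i]], List.Perm.swap _ _ _, hsub⟩
  · rintro ⟨x, y, hs, hp⟩
    obtain ⟨m, hm, hsub⟩ := hs
    rcases pv_pair_perm m x y hm with rfl | rfl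
    · obtain ⟨i, j, hi, hj, hij, hx, hy⟩ := pv_sublist_pair_index l x y hsub
      exact ⟨i, j, hi, hj, by omega, by rw [hx, hy]; exact hp⟩
    · obtain ⟨i, j, hi, hj, hij, hy, hx⟩ := pv_sublist_pair_index l y x hsub
      exact ⟨j, i, hj, hi, by omega, by rw [hx, hy]; exact hp⟩

-- pvHasPair is invariant under permutation
theorem pv_hasPair_perm {l l' : List String} (h : l.Perm l') : pvHasPair l ↔ pvHasPair l' := by
  rw [pv_pair_subperm_iff, pv_pair_subperm_iff]
  constructor <;> rintro ⟨x, y, hs, hp⟩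
  · exact ⟨x, y, hs.trans h.subperm, hp⟩
  · exact ⟨x, y, hs.trans h.symm.subperm, hp⟩

-- on a sorted list, a prefix pair exists iff an adjacent one does
theorem pv_sorted_pair_iff_adj (t : List String) (hs : t.Pairwise (· ≤ ·)) :
    pvHasPair t ↔ pvHasAdj t := by
  have mono' : ∀ p q (hpq : p ≤ q) (hq : q < t.length), t[p]'(Nat.lt_of_le_of_lt hpq hq) ≤ t[q] := by
    intro p q hpq hq
    rcases eq_or_lt_of_le hpq with rfl | h
    · exact le_refl _
    · exact List.pairwise_iff_getElem.mp hs p q (Nat.lt_of_le_of_lt hpq hq) hq h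
  constructor
  · rintro ⟨i, j, hi, hj, hne, hp⟩
    rcases Nat.lt_or_ge j i with hji | hge
    · -- j before i: t[j] ≤ t[j+1] ≤ t[i]
      have hj1 : j + 1 < t.length := by omega
      refine ⟨j, hj1, ?_⟩
      exact pv_str_sandwich _ _ _ (mono' j (j+1) (by omega) hj1) (mono' (j+1) i (by omega) hi) hp
    · -- i before j, but t[j] a prefix of t[i] forces t[i] = t[j]
      have hij : i < j := lt_of_le_of_ne hge hne
      have heq : t[i] = t[j] :=
        le_antisymm (mono' i j (by omega) hj) (pv_str_prefix_le _ _ hp)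
      have hi1 : i + 1 < t.length := by omega
      refine ⟨i, hi1, ?_⟩
      have h1 : t[i] ≤ t[i+1] := mono' i (i+1) (by omega) hi1
      have h2 : t[i+1] ≤ t[i] := heq ▸ mono' (i+1) j (by omega) hj
      rw [le_antisymm h1 h2]
  · rintro ⟨k, hk, hp⟩
    exact ⟨k + 1, k, hk, by omega, by omega, hp⟩

-- unfolding PySem.List.permutations
theorem pv_perm0 (zs : List String) : PySem.List.permutations zs 0 = [[]] := by
  rw [PySem.List.permutations]

theorem pv_perm1_mem (ys : List String) (x : List String) :
    x ∈ PySem.List.permutations ys 1 ↔ ∃ i, ∃ (_ : i < ys.length), x = [ys[i]] := by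
  rw [PySem.List.permutations]
  simp only [List.mem_flatMap, List.mem_range]
  constructor
  · rintro ⟨i, hi, hx⟩
    rw [List.getElem?_eq_getElem hi] at hx
    simp only [pv_perm0, List.map_cons, List.map_nil, List.mem_singleton] at hx
    exact ⟨i, hi, hx⟩
  · rintro ⟨i, hi, hx⟩
    refine ⟨i, hi, ?_⟩
    rw [List.getElem?_eq_getElem hi]
    simp [hx]

theorem pv_perm2_mem (l : List String) (x : List String) :
    x ∈ PySem.List.permutations l 2 ↔
      ∃ i, ∃ (_ : i < l.length), ∃ j, ∃ (_ : j < (l.eraseIdx i).length),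
        x = [l[i], (l.eraseIdx i)[j]] := by
  rw [PySem.List.permutations]
  simp only [List.mem_flatMap, List.mem_range]
  constructor
  · rintro ⟨i, hi, hx⟩
    rw [List.getElem?_eq_getElem hi] at hx
    simp only [List.mem_map] at hx
    obtain ⟨p, hp, hx⟩ := hx
    rw [show (1:Nat) = 0 + 1 from rfl] at hp
    rw [pv_perm1_mem] at hp
    obtain ⟨j, hj, rfl⟩ := hp
    exact ⟨i, hi, j, hj, hx.symm⟩
  · rintro ⟨i, hi, j, hj, hx⟩
    refine ⟨i, hi, ?_⟩
    rw [List.getElem?_eq_getElem hi]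
    simp only [List.mem_map]
    exact ⟨[(l.eraseIdx i)[j]], (pv_perm1_mem _ _).mpr ⟨j, hj, rfl⟩, by rw [hx]⟩

-- A's any over permutations l 2 tests exactly the distinct-position pairs
theorem pv_perm2_any_iff (l : List String) :
    ((PySem.List.permutations l 2).any
      (fun combi => PySem.Str.startswith (combi.getD 0 "") (combi.getD 1 "")) = true)
      ↔ pvHasPair l := by
  rw [List.any_eq_true]
  constructor
  · rintro ⟨x, hx, hq⟩
    rw [pv_perm2_mem] at hx
    obtain ⟨i, hi, j, hj, rfl⟩ := hx
    have hjlen : j < l.length - 1 := by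
      have := List.length_eraseIdx (l := l) (i := i)
      rw [if_pos hi] at this
      omega
    simp only [List.getD_cons_zero, List.getD_cons_succ] at hq
    rw [PySem.Str.startswith_eq, PySem.Chars.startswith_iff] at hq
    by_cases hji : j < i
    · refine ⟨i, j, hi, by omega, by omega, ?_⟩
      rwa [List.getElem_eraseIdx, dif_pos hji] at hq
    · refine ⟨i, j + 1, hi, by omega, by omega, ?_⟩
      rwa [List.getElem_eraseIdx, dif_neg hji] at hq
  · rintro ⟨i, k, hi, hk, hne, hp⟩
    have hlen : (l.eraseIdx i).length = l.length - 1 := by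
      rw [List.length_eraseIdx, if_pos hi]
    by_cases hki : k < i
    · refine ⟨[l[i], (l.eraseIdx i)[k]'(by omega)], (pv_perm2_mem _ _).mpr ⟨i, hi, k, by omega, rfl⟩, ?_⟩
      simp only [List.getD_cons_zero, List.getD_cons_succ]
      rw [PySem.Str.startswith_eq, PySem.Chars.startswith_iff]
      rwa [List.getElem_eraseIdx, dif_pos hki]
    · have hik : i < k := by omega
      refine ⟨[l[i], (l.eraseIdx i)[k-1]'(by omega)], (pv_perm2_mem _ _).mpr ⟨i, hi, k - 1, by omega, rfl⟩, ?_⟩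
      simp only [List.getD_cons_zero, List.getD_cons_succ]
      rw [PySem.Str.startswith_eq, PySem.Chars.startswith_iff]
      rw [List.getElem_eraseIdx, dif_neg (by omega)]
      have hk1 : k - 1 + 1 = k := by omega
      simpa [hk1] using hp

-- B's adjacent check
theorem pv_alt_all_iff (t : List String) :
    ((t.zip (PySem.List.slice t (some 1) none)).all
      (fun p => !(PySem.Str.startswith p.2 p.1)) = true) ↔ ¬ pvHasAdj t := by
  have hslice : PySem.List.slice t (some 1) none = t.drop 1 := by
    simpa using PySem.List.slice_from (xs := t) (a := (1 : Nat))
  rw [hslice, List.all_eq_true]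
  constructor
  · rintro hall ⟨k, hk, hp⟩
    have hmem : (t[k], t[k+1]) ∈ t.zip (t.drop 1) := by
      have hlen : k < (t.zip (t.drop 1)).length := by
        simp [List.length_zip]; omega
      have hget : (t.zip (t.drop 1))[k] = (t[k], t[k+1]) := by
        rw [List.getElem_zip]
        congr 1
        rw [List.getElem_drop]
        congr 1
        omega
      rw [← hget]
      exact List.getElem_mem hlen
    have hb := hall _ hmem
    rw [Bool.not_eq_eq_eq_not, Bool.not_true, PySem.Str.startswith_eq] at hb
    rw [← PySem.Chars.startswith_iff] at hp
    simp at hp hb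
    exact absurd hp (by simpa using hb)
  · intro hno p hp
    obtain ⟨k, hk, hpk⟩ := List.mem_iff_getElem.mp hp
    have hklen : k + 1 < t.length := by
      simp [List.length_zip] at hk
      omega
    have hpeq : p = (t[k], t[k+1]) := by
      rw [← hpk, List.getElem_zip]
      congr 1
      rw [List.getElem_drop]
      congr 1
      omega
    subst hpeq
    rw [Bool.not_eq_eq_eq_not, Bool.not_true, PySem.Str.startswith_eq]
    by_contra h
    simp only [Bool.not_eq_false] at h
    rw [PySem.Chars.startswith_iff] at h
    exact hno ⟨k, hklen, h⟩

-- ===== VERDICT (by name: the statement is the Claim_ definition above) =====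
theorem isConsistent_spec : Claim_equal_isConsistent := by
  intro list _
  unfold Spec_isConsistent isConsistent isConsistent_alt
  set s := list.map (fun e => PySem.Str.join "" (PySem.Str.split₀ e)) with hsdef
  set t := PySem.List.sorted s (fun x => x) false with htdef
  have hperm : t.Perm s := PySem.List.sorted_perm s (fun x => x) false
  have hpw : t.Pairwise (· ≤ ·) := by
    simpa using PySem.List.sorted_pairwise (xs := s) (key := fun x => x)
  have hiff : pvHasPair s ↔ pvHasAdj t :=
    (pv_hasPair_perm hperm.symm).trans (pv_sorted_pair_iff_adj t hpw)
  have hlent : t.length = list.length := by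
    rw [hperm.length_eq, hsdef, List.length_map]
  by_cases hlen : list.length ≤ 1
  · rw [if_pos hlen]
    have hno : ¬ pvHasAdj t := by
      rintro ⟨k, hk, -⟩
      omega
    exact ((pv_alt_all_iff t).mpr hno).symm
  · rw [if_neg hlen]
    by_cases hp : pvHasPair s
    · rw [if_pos ((pv_perm2_any_iff s).mpr hp)]
      have hadj : pvHasAdj t := hiff.mp hp
      have hne : ¬ ((t.zip (PySem.List.slice t (some 1) none)).all
          (fun p => !(PySem.Str.startswith p.2 p.1)) = true) := by
        rw [pv_alt_all_iff]; exact fun h => h hadj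
      simpa using (Bool.not_eq_true _).mp hne |>.symm
    · rw [if_neg (by rw [pv_perm2_any_iff]; exact hp)]
      exact ((pv_alt_all_iff t).mpr (fun h => hp (hiff.mpr h))).symm
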